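-- pv_equiv track=rewrite | github.com/San-Leandro-High-Makers-Club/cosmos-unknown | challenges.py | get_level_below
-- ===== SOURCE A (Python) =====
-- import string
-- from typing import List, Dict, Tuple, Set, Union
--
-- def get_level_below(edge_string: str, current_level: List[str]) -> List[str]:
--     edges = parse_edges(edge_string)[0]
--     level: List[str] = []
--     for potential_parent in current_level:
--         if potential_parent in edges:
--             for child in edges[potential_parent]:
--                 level.append(child)
--     return level
--
-- def parse_edges(edge_string: str) -> (Dict[str, List[str]], Dict[str, List[str]]):
--     edges: Dict[str, List[str]] = {}  # maps parent nodes to a list of child nodes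
--     for i in range(len(edge_string) - 1):
--         if edge_string[i] in string.ascii_lowercase and edge_string[i + 1] in string.ascii_lowercase:
--             if edge_string[i] not in edges:
--                 edges[edge_string[i]] = []
--             edges[edge_string[i]].append(edge_string[i + 1])
--
--     reverse_edges: Dict[str, List[str]] = {}  # maps child nodes to a list of its parents (hopefully only one parent)
--     for i in range(len(edge_string) - 1):
--         if edge_string[i] in string.ascii_lowercase and edge_string[i + 1] in string.ascii_lowercase:
--             if edge_string[i + 1] not in reverse_edges:
--                 reverse_edges[edge_string[i + 1]] = []
--             reverse_edges[edge_string[i + 1]].append(edge_string[i])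
--
--     return edges, reverse_edges
-- ===== SOURCE B (Python) =====
-- import string
--
-- def get_level_below(edge_string, current_level):
--     level = []
--     for parent in current_level:
--         for i in range(len(edge_string) - 1):
--             if edge_string[i] == parent and edge_string[i] in string.ascii_lowercase \
--                     and edge_string[i + 1] in string.ascii_lowercase:
--                 level.append(edge_string[i + 1])
--     return level
-- ===== Notes on version B (the rewrite author's own statement) =====
-- stated objective: simpler
-- what changed: B drops the prebuilt parent->children dict (and the unused reverse dict) entirely and instead, for each parent in current_level, scans the raw edge string once over adjacent index pairs, appending the successor character on a match.
import Mathlib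
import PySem

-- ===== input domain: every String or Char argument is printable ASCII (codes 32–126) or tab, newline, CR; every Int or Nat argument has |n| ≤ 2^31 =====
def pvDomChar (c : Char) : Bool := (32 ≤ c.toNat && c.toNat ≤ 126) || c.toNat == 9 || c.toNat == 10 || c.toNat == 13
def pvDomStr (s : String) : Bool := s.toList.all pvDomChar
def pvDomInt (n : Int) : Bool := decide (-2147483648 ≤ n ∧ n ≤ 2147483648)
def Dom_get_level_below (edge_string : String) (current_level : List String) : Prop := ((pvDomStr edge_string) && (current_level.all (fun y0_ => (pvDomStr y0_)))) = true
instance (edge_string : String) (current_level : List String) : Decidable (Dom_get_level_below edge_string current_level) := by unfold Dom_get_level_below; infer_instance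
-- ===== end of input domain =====

-- B replaces A's prebuilt parent→children dict by a direct rescan of the edge string per parent (simpler; no dict).

-- ===== PORT A =====
-- membership of a one-character string in string.ascii_lowercase (exact for single chars)
def pvLower (c : Char) : Bool := 'a' ≤ c && c ≤ 'z'

-- the first loop of parse_edges: 'for i in range(len(s)-1)' walks adjacent pairs
def pvBuildEdges : List Char → PySem.Dict String (List String) → PySem.Dict String (List String)
  | c1 :: c2 :: rest, d =>
      pvBuildEdges (c2 :: rest)
        (if pvLower c1 && pvLower c2 then
          let k := String.ofList [c1]
          let d1 := if d.contains k then d else d.insert k []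
          d1.modify k [] (fun l => l ++ [String.ofList [c2]])
        else d)
  | _, d => d

-- the second loop of parse_edges (reverse_edges; returned by parse_edges, unused by A)
def pvBuildReverse : List Char → PySem.Dict String (List String) → PySem.Dict String (List String)
  | c1 :: c2 :: rest, d =>
      pvBuildReverse (c2 :: rest)
        (if pvLower c1 && pvLower c2 then
          let k := String.ofList [c2]
          let d1 := if d.contains k then d else d.insert k []
          d1.modify k [] (fun l => l ++ [String.ofList [c1]])
        else d)
  | _, d => d

def pvParseEdges (cs : List Char) :
    PySem.Dict String (List String) × PySem.Dict String (List String) :=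
  (pvBuildEdges cs PySem.Dict.empty, pvBuildReverse cs PySem.Dict.empty)

def get_level_below (edge_string : String) (current_level : List String) : List String :=
  let edges := (pvParseEdges edge_string.toList).1
  current_level.foldl
    (fun level p =>
      if edges.contains p then
        (edges.getD p []).foldl (fun l c => l ++ [c]) level
      else level) []

-- ===== PORT B =====
-- for one parent p, one scan of the edge string over adjacent pairs
def pvScan (p : String) : List Char → List String → List String
  | c1 :: c2 :: rest, acc =>
      pvScan p (c2 :: rest)
        (if String.ofList [c1] == p && pvLower c1 && pvLower c2 then acc ++ [String.ofList [c2]] else acc)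
  | _, acc => acc

def get_level_below_alt (edge_string : String) (current_level : List String) : List String :=
  current_level.foldl (fun level p => pvScan p edge_string.toList level) []

-- ===== PRECONDITION & SPEC =====
def Spec_get_level_below (edge_string : String) (current_level : List String) (out : List String) : Prop := out = get_level_below_alt edge_string current_level
instance (edge_string : String) (current_level : List String) (out : List String) : Decidable (Spec_get_level_below edge_string current_level out) := by unfold Spec_get_level_below; infer_instance

-- ===== CLAIM (what is proved, stated in full; the proofs are below) =====
def Claim_equal_get_level_below : Prop := ∀ (edge_string : String) (current_level : List String), Dom_get_level_below edge_string current_level → Spec_get_level_below edge_string current_level (get_level_below edge_string current_level)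

-- ===== LEMMAS AND PROOFS =====

-- the children of parent p, in scan order (proof-side characterisation)
def pvChildren (p : String) : List Char → List String
  | c1 :: c2 :: rest =>
      (if String.ofList [c1] == p && pvLower c1 && pvLower c2 then [String.ofList [c2]] else [])
        ++ pvChildren p (c2 :: rest)
  | _ => []

theorem pvScan_eq (p : String) : ∀ (cs : List Char) (acc : List String),
    pvScan p cs acc = acc ++ pvChildren p cs
  | [], acc => by simp [pvScan, pvChildren]
  | [c], acc => by simp [pvScan, pvChildren]
  | c1 :: c2 :: rest, acc => by
      rw [pvScan, pvChildren, pvScan_eq p (c2 :: rest)]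
      split <;> simp

theorem pvBuild_getD (p : String) : ∀ (cs : List Char) (d : PySem.Dict String (List String)),
    (pvBuildEdges cs d).getD p [] = d.getD p [] ++ pvChildren p cs
  | [], d => by simp [pvBuildEdges, pvChildren]
  | [c], d => by simp [pvBuildEdges, pvChildren]
  | c1 :: c2 :: rest, d => by
      rw [pvBuildEdges, pvChildren, pvBuild_getD p (c2 :: rest)]
      cases h1 : pvLower c1 <;> cases h2 : pvLower c2 <;>
        simp only [Bool.and_false, Bool.and_true, Bool.false_eq_true, if_false,
          List.nil_append, if_true]
      by_cases hk : String.ofList [c1] = p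
      · subst hk
        simp only [beq_self_eq_true, if_true]
        rw [PySem.Dict.getD_modify_self]
        by_cases hc : d.contains (String.ofList [c1]) = true
        · simp [hc]
        · simp only [Bool.not_eq_true] at hc
          rw [if_neg (by simp [hc]), PySem.Dict.getD_insert_self,
            PySem.Dict.getD_of_not_contains d _ hc]
          simp
      · have hb : (String.ofList [c1] == p) = false := by simp [hk]
        simp only [hb, Bool.false_eq_true, if_false, List.nil_append]
        rw [PySem.Dict.getD_modify_of_ne _ _ _ (Ne.symm hk)]
        split
        · rfl
        · rw [PySem.Dict.getD_insert_of_ne _ _ _ (Ne.symm hk)]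

theorem pvBuild_contains (p : String) : ∀ (cs : List Char) (d : PySem.Dict String (List String)),
    (pvBuildEdges cs d).contains p = (d.contains p || !(pvChildren p cs).isEmpty)
  | [], d => by simp [pvBuildEdges, pvChildren]
  | [c], d => by simp [pvBuildEdges, pvChildren]
  | c1 :: c2 :: rest, d => by
      rw [pvBuildEdges, pvChildren, pvBuild_contains p (c2 :: rest)]
      cases h1 : pvLower c1 <;> cases h2 : pvLower c2 <;>
        simp only [Bool.and_false, Bool.and_true, Bool.false_eq_true, if_false,
          List.nil_append, if_true]
      by_cases hk : String.ofList [c1] = p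
      · subst hk
        simp only [beq_self_eq_true, if_true]
        rw [PySem.Dict.contains_modify]
        split <;> simp
      · have hb : (String.ofList [c1] == p) = false := by simp [hk]
        have hpk : (p == String.ofList [c1]) = false := by simp [Ne.symm hk]
        simp only [hb, Bool.false_eq_true, if_false, List.nil_append]
        rw [PySem.Dict.contains_modify]
        split <;> simp [PySem.Dict.contains_insert, hpk]

-- the two per-parent loop bodies agree
theorem pvStep_eq (cs : List Char) (level : List String) (p : String) :
    (if (pvBuildEdges cs PySem.Dict.empty).contains p then
        ((pvBuildEdges cs PySem.Dict.empty).getD p []).foldl (fun l c => l ++ [c]) level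
      else level) = pvScan p cs level := by
  rw [pvScan_eq, pvBuild_contains, pvBuild_getD, PySem.Dict.contains_empty,
    PySem.Dict.getD_empty, PySem.List.foldl_append_singleton]
  cases hch : (pvChildren p cs).isEmpty
  · simp
  · simp [List.isEmpty_iff.mp hch]

-- ===== VERDICT (by name: the statement is the Claim_ definition above) =====
theorem get_level_below_spec : Claim_equal_get_level_below := by
  intro es cl _
  unfold Spec_get_level_below get_level_below get_level_below_alt pvParseEdges
  simp only []
  exact congrFun (congrFun (congrArg List.foldl
    (funext fun level => funext fun p => pvStep_eq es.toList level p)) []) cl
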